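-- pv_equiv track=rewrite | github.com/livinNector/bapsap | src/bapsap/tubestate.py | tube_entropy
-- ===== SOURCE A (Python) =====
-- def tube_entropy(tube):
--     entropy = 0
--     if tube:
--         # entropy atleast one for non empty tubes
--         entropy += 1
--     for i in range(1, len(tube)):
--         # add one to entropy for every change of color
--         if tube[i] != tube[i - 1]:
--             entropy += 1
--     return entropy
-- ===== SOURCE B (Python) =====
-- def tube_entropy(tube):
--     # count maximal runs: take a run's head, then consume the whole run, one pass
--     count = 0
--     it = iter(tube)
--     sentinel = object()
--     head = next(it, sentinel)
--     while head is not sentinel: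
--         count += 1
--         x = next(it, sentinel)
--         while x is not sentinel and x == head:
--             x = next(it, sentinel)
--         head = x
--     return count
-- ===== Notes on version B (the rewrite author's own statement) =====
-- stated objective: alternative
-- what changed: B counts maximal runs directly with a nested run-skipping pass over an iterator instead of A's index loop that increments a counter on every adjacent color change.
import Mathlib
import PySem

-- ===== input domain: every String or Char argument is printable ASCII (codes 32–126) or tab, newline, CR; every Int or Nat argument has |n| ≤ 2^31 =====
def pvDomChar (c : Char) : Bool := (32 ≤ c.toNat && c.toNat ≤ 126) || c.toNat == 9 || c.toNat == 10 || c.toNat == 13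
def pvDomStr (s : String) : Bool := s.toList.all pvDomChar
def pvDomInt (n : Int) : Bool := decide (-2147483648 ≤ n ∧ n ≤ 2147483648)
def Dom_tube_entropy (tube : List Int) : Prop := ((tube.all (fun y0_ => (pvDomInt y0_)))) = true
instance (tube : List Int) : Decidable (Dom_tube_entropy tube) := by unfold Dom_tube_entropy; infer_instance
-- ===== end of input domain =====

-- B counts maximal runs with a nested run-skipping pass instead of A's adjacent-change counter; alternative decomposition, same return value.


-- ===== PORT A =====
def tube_entropy (tube : List Int) : Int :=
  let entropy : Int := 0
  let entropy := if tube ≠ [] then entropy + 1 else entropy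
  (PySem.List.pyRange 1 (tube.length : Int) 1).foldl
    (fun entropy i =>
      if PySem.List.pyGetD tube i 0 ≠ PySem.List.pyGetD tube (i - 1) 0 then entropy + 1 else entropy)
    entropy

-- ===== PORT B =====
-- outer while: one iteration per run (count += 1); inner while: consume the run = dropWhile (== head)
def runsAux : List Int → Int → Int
  | [], count => count
  | head :: rest, count => runsAux (rest.dropWhile (fun x => x == head)) (count + 1)
termination_by l _ => l.length
decreasing_by
  exact Nat.lt_succ_of_le (List.length_dropWhile_le _ _)

def tube_entropy_alt (tube : List Int) : Int := runsAux tube 0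

-- ===== PRECONDITION & SPEC =====
def Spec_tube_entropy (tube : List Int) (out : Int) : Prop := out = tube_entropy_alt tube
instance (tube : List Int) (out : Int) : Decidable (Spec_tube_entropy tube out) := by unfold Spec_tube_entropy; infer_instance

-- ===== CLAIM (what is proved, stated in full; the proofs are below) =====
def Claim_equal_tube_entropy : Prop := ∀ (tube : List Int), Dom_tube_entropy tube → Spec_tube_entropy tube (tube_entropy tube)

-- ===== LEMMAS AND PROOFS =====

-- number of adjacent unequal pairs
def adjCount : List Int → Int
  | a :: b :: t => (if a ≠ b then 1 else 0) + adjCount (b :: t)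
  | _ => 0

-- A's loop, one index at a time, equals the adjacent-pair count of the remaining suffix
lemma loopAux (tube : List Int) :
    ∀ (m k : Nat) (e : Int), tube.length - k = m →
      (PySem.List.pyRange ((k : Int) + 1) (tube.length : Int) 1).foldl
        (fun entropy i =>
          if PySem.List.pyGetD tube i 0 ≠ PySem.List.pyGetD tube (i - 1) 0 then entropy + 1 else entropy)
        e = e + adjCount (tube.drop k) := by
  intro m
  induction m with
  | zero =>
    intro k e hk
    have hlen : tube.length ≤ k := by omega
    rw [PySem.List.pyRange_one_eq_nil (by exact_mod_cast by omega)]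
    simp [List.drop_eq_nil_of_le hlen, adjCount]
  | succ n ih =>
    intro k e hk
    have hklt : k < tube.length := by omega
    by_cases hk1 : k + 1 < tube.length
    · have hcons : PySem.List.pyRange ((k : Int) + 1) (tube.length : Int) 1
          = ((k : Int) + 1) :: PySem.List.pyRange ((k : Int) + 1 + 1) (tube.length : Int) 1 :=
        PySem.List.pyRange_one_cons (by exact_mod_cast by omega)
      rw [hcons]
      simp only [List.foldl_cons]
      have hget1 : PySem.List.pyGetD tube ((k : Int) + 1) 0 = tube[k + 1]'hk1 := by
        have := PySem.List.pyGetD_eq_getElem tube (i := (k : Int) + 1) 0 (by omega)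
          (by exact_mod_cast by omega)
        simpa using this
      have hget0 : PySem.List.pyGetD tube ((k : Int) + 1 - 1) 0 = tube[k]'hklt := by
        have := PySem.List.pyGetD_eq_getElem tube (i := (k : Int)) 0 (by omega)
          (by exact_mod_cast hklt)
        simpa using this
      have hih := ih (k + 1)
        (if PySem.List.pyGetD tube ((k : Int) + 1) 0 ≠ PySem.List.pyGetD tube ((k : Int) + 1 - 1) 0
          then e + 1 else e) (by omega)
      have hcast : ((k + 1 : Nat) : Int) + 1 = (k : Int) + 1 + 1 := by push_cast; ring
      rw [hcast] at hih
      rw [hih]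
      have hdropk : tube.drop k = tube[k]'hklt :: tube.drop (k + 1) :=
        List.drop_eq_getElem_cons hklt
      have hdropk1 : tube.drop (k + 1) = tube[k + 1]'hk1 :: tube.drop (k + 2) :=
        List.drop_eq_getElem_cons hk1
      rw [hdropk, hdropk1, hget1, hget0]
      show _ = e + ((if tube[k]'hklt ≠ tube[k+1]'hk1 then 1 else 0) + adjCount (tube[k+1]'hk1 :: tube.drop (k+2)))
      rw [← hdropk1]
      by_cases hne : tube[k + 1]'hk1 = tube[k]'hklt
      · simp [hne]
      · simp only [ne_eq, hne, not_false_iff, if_true]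
        have : ¬ tube[k]'hklt = tube[k + 1]'hk1 := fun h => hne h.symm
        simp [this]; ring
    · -- k + 1 = tube.length : the range is empty and the suffix is a singleton
      have hk1e : k + 1 = tube.length := by omega
      rw [PySem.List.pyRange_one_eq_nil (by exact_mod_cast by omega)]
      have hdropk : tube.drop k = tube[k]'hklt :: tube.drop (k + 1) :=
        List.drop_eq_getElem_cons hklt
      have : tube.drop (k + 1) = [] := List.drop_eq_nil_of_le (by omega)
      rw [hdropk, this]
      simp [adjCount]

-- B's outer loop: count of runs of (head :: rest) starting from count
lemma runsAux_eq : ∀ (t : List Int) (a : Int) (c : Int),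
    runsAux (a :: t) c = c + 1 + adjCount (a :: t) := by
  intro t
  induction t with
  | nil => intro a c; simp [runsAux, adjCount]
  | cons b t' ih =>
    intro a c
    rw [runsAux]
    by_cases hab : b = a
    · subst hab
      have hdw : (b :: t').dropWhile (fun x => x == b) = t'.dropWhile (fun x => x == b) := by
        simp [List.dropWhile]
      rw [hdw]
      have : runsAux (b :: t') c = runsAux (t'.dropWhile (fun x => x == b)) (c + 1) := by
        rw [runsAux]
      rw [← this, ih b c]
      simp [adjCount]
    · have hfa : (b == a) = false := by simp [hab]
      have hdw : (b :: t').dropWhile (fun x => x == a) = b :: t' := by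
        simp [List.dropWhile, hfa]
      rw [hdw, ih b (c + 1)]
      have hne : a ≠ b := fun h => hab h.symm
      simp [adjCount, hne]
      ring

-- ===== VERDICT (by name: the statement is the Claim_ definition above) =====
theorem tube_entropy_spec : Claim_equal_tube_entropy := by
  intro tube _
  unfold Spec_tube_entropy tube_entropy tube_entropy_alt
  cases tube with
  | nil => simp [runsAux, PySem.List.pyRange_one_eq_nil]
  | cons a t =>
    simp only [ne_eq, reduceCtorEq, not_false_iff, if_true]
    have h := loopAux (a :: t) ((a :: t).length) 0 (0 + 1) (by omega)
    simp only [Nat.cast_zero, zero_add, List.drop_zero, ne_eq] at h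
    simp only [zero_add]
    rw [h, runsAux_eq t a 0]
    ring
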